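-- pv_equiv track=rewrite | github.com/tcztzy/skills | skills/paper-visualizer/scripts/manuscript_figure.py | strip_tex_comments
-- ===== SOURCE A (Python) =====
-- def strip_tex_comments(text: str) -> str:
--     lines: list[str] = []
--     for line in text.splitlines():
--         chars: list[str] = []
--         escaped = False
--         for char in line:
--             if char == "%" and not escaped:
--                 break
--             chars.append(char)
--             escaped = char == "\\" and not escaped
--             if char != "\\":
--                 escaped = False
--         lines.append("".join(chars))
--     return "\n".join(lines)
-- ===== SOURCE B (Python) =====
-- def _strip_line(line: str) -> str:
--     kept: list[str] = []
--     i = 0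
--     while i < len(line):
--         c = line[i]
--         if c == "\\":
--             kept.extend(line[i:i + 2])
--             i += 2
--         elif c == "%":
--             break
--         else:
--             kept.append(c)
--             i += 1
--     return "".join(kept)
--
--
-- def strip_tex_comments(text: str) -> str:
--     return "\n".join(_strip_line(line) for line in text.splitlines())
-- ===== Notes on version B (the rewrite author's own statement) =====
-- stated objective: simpler
-- what changed: Replaces the boolean escape-flag state machine with a per-line scanner that consumes a backslash together with its escaped character as an atomic two-character unit (i += 2), so no escape state is carried between iterations.
import Mathlib
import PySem

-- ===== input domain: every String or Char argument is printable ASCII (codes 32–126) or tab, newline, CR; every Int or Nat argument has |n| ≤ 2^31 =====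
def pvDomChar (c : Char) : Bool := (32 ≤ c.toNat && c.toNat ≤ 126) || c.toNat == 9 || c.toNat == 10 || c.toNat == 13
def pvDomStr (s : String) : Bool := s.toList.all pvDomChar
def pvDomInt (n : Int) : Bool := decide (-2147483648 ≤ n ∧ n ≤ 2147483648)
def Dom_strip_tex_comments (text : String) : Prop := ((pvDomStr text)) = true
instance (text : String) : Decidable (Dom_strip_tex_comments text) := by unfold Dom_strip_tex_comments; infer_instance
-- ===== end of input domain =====

-- B replaces A's boolean escape-flag state machine with a per-line scanner that
-- consumes each backslash together with its escaped character as one two-character unit (objective: simpler).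


-- ===== PORT A =====
-- inner character loop of A: collects chars until an unescaped '%', carrying the `escaped` flag
def pvAline : List Char → Bool → List Char
  | [], _ => []
  | c :: rest, escaped =>
    if c = '%' ∧ escaped = false then []
    else
      let escaped1 := (c == '\\') && !escaped
      let escaped2 := if c ≠ '\\' then false else escaped1
      c :: pvAline rest escaped2

def strip_tex_comments (text : String) : String :=
  let lines := (PySem.Str.splitlines text).foldl
    (fun acc line => acc ++ [String.ofList (pvAline line.toList false)]) []
  PySem.Str.join "\n" lines

-- ===== PORT B =====
-- inner loop of B (_strip_line): a '\' is kept together with the following char (i += 2), no escape flag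
def pvBline : List Char → List Char
  | [] => []
  | c :: rest =>
    if c = '\\' then
      match rest with
      | [] => [c]                       -- line[i:i+2] is just the lone backslash
      | d :: rest' => c :: d :: pvBline rest'
    else if c = '%' then []
    else c :: pvBline rest

def strip_tex_comments_alt (text : String) : String :=
  PySem.Str.join "\n" ((PySem.Str.splitlines text).map (fun line => String.ofList (pvBline line.toList)))

-- ===== PRECONDITION & SPEC =====
def Spec_strip_tex_comments (text : String) (out : String) : Prop := out = strip_tex_comments_alt text
instance (text : String) (out : String) : Decidable (Spec_strip_tex_comments text out) := by unfold Spec_strip_tex_comments; infer_instance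

-- ===== CLAIM (what is proved, stated in full; the proofs are below) =====
def Claim_equal_strip_tex_comments : Prop := ∀ (text : String), Dom_strip_tex_comments text → Spec_strip_tex_comments text (strip_tex_comments text)

-- ===== LEMMAS AND PROOFS =====

-- per-line equivalence: the escape-flag scan equals the pair-consuming scan
theorem pvAline_eq_pvBline (cs : List Char) : pvAline cs false = pvBline cs := by
  induction cs using pvBline.induct with
  | case1 => rfl
  | case2 => simp [pvAline, pvBline]
  | case3 d rest' ih =>
    by_cases hd : d = '\\' <;> simp [pvAline, pvBline, hd, ih]
  | case4 rest h => rw [pvBline.eq_def]; simp [pvAline, h]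
  | case5 c rest h1 h2 ih => rw [pvAline, pvBline.eq_def]; simp [h1, h2, ih]

-- ===== VERDICT (by name: the statement is the Claim_ definition above) =====
theorem strip_tex_comments_spec : Claim_equal_strip_tex_comments := by
  intro text _
  unfold Spec_strip_tex_comments strip_tex_comments strip_tex_comments_alt
  rw [PySem.List.foldl_append_singleton_eq_map]
  simp [pvAline_eq_pvBline]
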